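-- pv_equiv track=rewrite | github.com/neilerer/ByteMe | pathfinder/dijkstra_final/pathfinder/dijkstra_merge_sort.py | end_route_first
-- ===== SOURCE A (Python) =====
-- def end_route_first(d, end_routes_list):
-- 	# create the return object
-- 	d_return = {}
-- 	d_temp = {}
-- 	#
-- 	while len(d) > 0:
-- 		journey_id = next(iter(d))
-- 		quadruple = d[journey_id]
-- 		route = quadruple[2]
-- 		if route in end_routes_list:
-- 			d_return[journey_id] = quadruple
-- 		else:
-- 			d_temp[journey_id] = quadruple
-- 		del d[journey_id]
--
-- 	while len(d_temp) > 0: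
-- 		journey_id = next(iter(d_temp))
-- 		quadruple = d_temp[journey_id]
-- 		d_return[journey_id] = quadruple
-- 		del d_temp[journey_id]
--
-- 	return d_return
-- ===== SOURCE B (Python) =====
-- def end_route_first(d, end_routes_list):
-- 	# Single stable sort instead of two-bucket dispatch; d is emptied like A empties it.
-- 	items = list(d.items())
-- 	d.clear()
-- 	ends = set(end_routes_list)
-- 	items.sort(key=lambda kv: kv[1][2] not in ends)
-- 	return dict(items)
-- ===== Notes on version B (the rewrite author's own statement) =====
-- stated objective: faster
-- what changed: A drains the dict entry by entry (next(iter)+del) into two bucket dicts with an O(m) list membership test and then concatenates them; B snapshots the items once, does a single stable sort on the binary key 'route not in end_routes' (set membership) so matching entries come first in original order, and rebuilds the dict.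
import Mathlib
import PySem

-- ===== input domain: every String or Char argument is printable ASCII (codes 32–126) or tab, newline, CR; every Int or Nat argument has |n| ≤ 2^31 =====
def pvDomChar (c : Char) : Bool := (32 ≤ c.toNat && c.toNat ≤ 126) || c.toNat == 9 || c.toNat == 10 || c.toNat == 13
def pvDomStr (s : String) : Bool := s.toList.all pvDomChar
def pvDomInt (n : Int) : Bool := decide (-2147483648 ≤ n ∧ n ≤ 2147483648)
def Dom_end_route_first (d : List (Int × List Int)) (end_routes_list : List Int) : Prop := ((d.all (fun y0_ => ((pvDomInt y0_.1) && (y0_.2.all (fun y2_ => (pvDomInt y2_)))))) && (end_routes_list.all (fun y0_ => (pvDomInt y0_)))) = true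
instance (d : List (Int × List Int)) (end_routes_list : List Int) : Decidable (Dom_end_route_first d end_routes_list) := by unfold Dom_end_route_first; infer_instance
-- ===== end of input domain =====

-- B replaces A's entry-by-entry two-bucket drain with one stable sort on a binary key over a
-- membership set (objective: faster, measured). Return-value equivalence
-- only: both Pythons empty the input dict d.

-- ===== PORT A =====
-- First while loop: pops the first entry of d each round into d_return / d_temp.
-- Under Pre_ the keys are distinct (d models a Python dict) and each value has length ≥ 3,
-- so quadruple[2] = pyGetD v 2 0 exactly and each dict assignment appends a fresh key.
def erfLoop1 (d : List (Int × List Int)) (end_routes_list : List Int)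
    (d_return d_temp : List (Int × List Int)) : List (Int × List Int) × List (Int × List Int) :=
  match d with
  | [] => (d_return, d_temp)
  | (journey_id, quadruple) :: rest =>
      let route := PySem.List.pyGetD quadruple 2 0
      if end_routes_list.contains route then
        erfLoop1 rest end_routes_list (d_return ++ [(journey_id, quadruple)]) d_temp
      else
        erfLoop1 rest end_routes_list d_return (d_temp ++ [(journey_id, quadruple)])

def end_route_first (d : List (Int × List Int)) (end_routes_list : List Int) : List (Int × List Int) :=
  let p := erfLoop1 d end_routes_list [] []
  -- second while loop: pops each entry of d_temp and appends it to d_return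
  p.2.foldl (fun d_return kv => d_return ++ [kv]) p.1

-- ===== PORT B =====
-- items.sort(key=lambda kv: kv[1][2] not in ends): Python sorts False (0) before True (1);
-- the Bool key is ported as the Int 0/1 it compares as.  dict(items) = PySem.Dict.ofList.
def end_route_first_alt (d : List (Int × List Int)) (end_routes_list : List Int) : List (Int × List Int) :=
  let ends := PySem.Set.ofList end_routes_list
  let items := PySem.List.sorted d
    (fun kv => if ends.contains (PySem.List.pyGetD kv.2 2 0) then (0 : Int) else 1) false
  (PySem.Dict.ofList items).items

-- ===== PRECONDITION & SPEC =====
-- Pre_ excludes (a) assoc lists with duplicate keys, which no Python dict argument can present,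
-- and (b) entries whose value has fewer than 3 elements, on which A raises IndexError.
def Pre_end_route_first (d : List (Int × List Int)) (end_routes_list : List Int) : Prop :=
  (d.map Prod.fst).Nodup ∧ ∀ kv ∈ d, 3 ≤ kv.2.length
instance (d : List (Int × List Int)) (end_routes_list : List Int) : Decidable (Pre_end_route_first d end_routes_list) := by unfold Pre_end_route_first; infer_instance

def pvWitness_end_route_first : (List (Int × List Int)) × List Int :=
  ([(1, [10, 11, 5, 12]), (2, [20, 21, 7, 22]), (3, [30, 31, 5, 32])], [5, 9])

def Spec_end_route_first (d : List (Int × List Int)) (end_routes_list : List Int) (out : List (Int × List Int)) : Prop := out = end_route_first_alt d end_routes_list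
instance (d : List (Int × List Int)) (end_routes_list : List Int) (out : List (Int × List Int)) : Decidable (Spec_end_route_first d end_routes_list out) := by unfold Spec_end_route_first; infer_instance

-- ===== CLAIM (what is proved, stated in full; the proofs are below) =====
def Claim_equal_end_route_first : Prop := ∀ (d : List (Int × List Int)) (end_routes_list : List Int), Dom_end_route_first d end_routes_list → Pre_end_route_first d end_routes_list → Spec_end_route_first d end_routes_list (end_route_first d end_routes_list)

-- ===== LEMMAS AND PROOFS =====

-- A's first loop splits d into (accumulated) matches and non-matches, in order.
theorem erfLoop1_eq (d : List (Int × List Int)) (erl : List Int)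
    (R T : List (Int × List Int)) :
    erfLoop1 d erl R T =
      (R ++ d.filter (fun kv => erl.contains (PySem.List.pyGetD kv.2 2 0)),
       T ++ d.filter (fun kv => !erl.contains (PySem.List.pyGetD kv.2 2 0))) := by
  induction d generalizing R T with
  | nil => simp [erfLoop1]
  | cons kv rest ih =>
      obtain ⟨k, v⟩ := kv
      by_cases h : PySem.List.pyGetD v 2 0 ∈ erl
      · have hc : erl.contains (PySem.List.pyGetD v 2 0) = true := by
          simpa [List.contains_eq_mem] using h
        simp [erfLoop1, h, ih]
      · have hc : erl.contains (PySem.List.pyGetD v 2 0) = false := by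
          simpa [List.contains_eq_mem] using h
        simp [erfLoop1, h, ih]

-- inserting a p-element into (all-p prefix ++ all-not-p suffix) puts it between the two
theorem insertBy_binary_true {α : Type} (p : α → Bool) (x : α) (hx : p x = true)
    (F G : List α) (hF : ∀ y ∈ F, p y = true) (hG : ∀ y ∈ G, p y = false) :
    PySem.List.insertBy
      (fun a b => decide ((if p a then (0 : Int) else 1) < (if p b then (0 : Int) else 1)))
      x (F ++ G) = F ++ x :: G := by
  induction F with
  | nil =>
      cases G with
      | nil => simpa using PySem.List.insertBy_of_forall_not_before _ x [] (by simp)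
      | cons g G' =>
          have hg := hG g (by simp)
          simp only [List.nil_append]
          rw [PySem.List.insertBy]
          simp only [hx, hg]
          norm_num
  | cons f F' ih =>
      have hf := hF f (by simp)
      simp only [List.cons_append]
      rw [PySem.List.insertBy]
      simp only [hx, hf]
      norm_num
      exact ih (fun y hy => hF y (by simp [hy]))

-- inserting a not-p element appends it at the end
theorem insertBy_binary_false {α : Type} (p : α → Bool) (x : α) (hx : p x = false)
    (L : List α) :
    PySem.List.insertBy
      (fun a b => decide ((if p a then (0 : Int) else 1) < (if p b then (0 : Int) else 1)))
      x L = L ++ [x] := by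
  apply PySem.List.insertBy_of_forall_not_before
  intro y _
  by_cases h : p y <;> simp [hx, h]

-- Python's stable sort on the binary key 0/1 is exactly filter ++ filter.
theorem sorted_binary_key {α : Type} (xs : List α) (p : α → Bool) :
    PySem.List.sorted xs (fun x => if p x then (0 : Int) else 1) false =
      xs.filter p ++ xs.filter (fun x => !p x) := by
  rw [PySem.List.sorted_eq_foldl_insertBy]
  suffices h : ∀ (F G : List α), (∀ y ∈ F, p y = true) → (∀ y ∈ G, p y = false) →
      xs.foldl (fun acc x => PySem.List.insertBy
        (fun a b => decide ((if p a then (0 : Int) else 1) < (if p b then (0 : Int) else 1)))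
        x acc) (F ++ G)
      = (F ++ xs.filter p) ++ (G ++ xs.filter (fun x => !p x)) by
    simpa using h [] [] (by simp) (by simp)
  induction xs with
  | nil => intro F G _ _; simp
  | cons x rest ih =>
      intro F G hF hG
      by_cases hx : p x
      · have : PySem.List.insertBy
            (fun a b => decide ((if p a then (0 : Int) else 1) < (if p b then (0 : Int) else 1)))
            x (F ++ G) = (F ++ [x]) ++ G := by
          rw [insertBy_binary_true p x hx F G hF hG]; simp
        have hF' : ∀ y ∈ F ++ [x], p y = true := by
          intro y hy
          rcases List.mem_append.1 hy with h | h
          · exact hF y h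
          · simp at h; simpa [h] using hx
        simp only [List.foldl_cons, this]
        rw [ih (F ++ [x]) G hF' hG]
        simp [hx]
      · have hx' : p x = false := by simpa using hx
        have : PySem.List.insertBy
            (fun a b => decide ((if p a then (0 : Int) else 1) < (if p b then (0 : Int) else 1)))
            x (F ++ G) = F ++ (G ++ [x]) := by
          rw [insertBy_binary_false p x hx' (F ++ G)]; simp
        have hG' : ∀ y ∈ G ++ [x], p y = false := by
          intro y hy
          rcases List.mem_append.1 hy with h | h
          · exact hG y h
          · simp at h; simpa [h] using hx'
        simp only [List.foldl_cons, this]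
        rw [ih F (G ++ [x]) hF hG']
        simp [hx']
  
-- dict(items) on a list with pairwise-distinct keys returns the list itself
theorem dict_ofList_items_of_nodup (l : List (Int × List Int))
    (h : (l.map Prod.fst).Nodup) : (PySem.Dict.ofList l).items = l := by
  suffices h' : ∀ (acc : List (Int × List Int)), (l.map Prod.fst).Nodup →
      (∀ k ∈ l.map Prod.fst, ¬ (PySem.Dict.mk acc).contains k) →
      (PySem.Dict.update (PySem.Dict.mk acc) l).items = acc ++ l by
    simpa using h' [] h (by simp [PySem.Dict.contains])
  clear h
  induction l with
  | nil => intro acc _ _; simp [PySem.Dict.update]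
  | cons kv rest ih =>
      intro acc hnd hfresh
      obtain ⟨k, v⟩ := kv
      have hk : ¬ (PySem.Dict.mk acc).contains k := hfresh k (by simp)
      have hins : (PySem.Dict.mk acc).insert k v = PySem.Dict.mk (acc ++ [(k, v)]) := by
        simp [PySem.Dict.insert, hk]
      have : PySem.Dict.update (PySem.Dict.mk acc) ((k, v) :: rest)
          = PySem.Dict.update (PySem.Dict.mk (acc ++ [(k, v)])) rest := by
        simp [PySem.Dict.update, hins]
      rw [List.map_cons, List.nodup_cons] at hnd
      have hknot : k ∉ rest.map Prod.fst := hnd.1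
      have hfresh' : ∀ k' ∈ rest.map Prod.fst, ¬ (PySem.Dict.mk (acc ++ [(k, v)])).contains k' := by
        intro k' hk'
        have h1 := hfresh k' (by simp [hk'])
        have h2 : k ≠ k' := fun he => hknot (he ▸ hk')
        simp [PySem.Dict.contains] at h1 ⊢
        exact ⟨h1, h2⟩
      rw [this, ih (acc ++ [(k, v)]) hnd.2 hfresh']
      simp

theorem set_ofList_contains (erl : List Int) (x : Int) :
    (PySem.Set.ofList erl).contains x = erl.contains x := by
  simp [PySem.Set.contains, List.contains_eq_mem, PySem.Set.mem_ofList]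

-- ===== VERDICT (by name: the statement is the Claim_ definition above) =====
theorem end_route_first_spec : Claim_equal_end_route_first := by
  intro d erl _ hpre
  obtain ⟨hnd, _⟩ := hpre
  have hkey : (fun kv : Int × List Int =>
      if (PySem.Set.ofList erl).contains (PySem.List.pyGetD kv.2 2 0) then (0 : Int) else 1)
      = fun kv => if (fun kv : Int × List Int => erl.contains (PySem.List.pyGetD kv.2 2 0)) kv then (0 : Int) else 1 := by
    funext kv; rw [set_ofList_contains]
  have hnd' : ((d.filter (fun kv => erl.contains (PySem.List.pyGetD kv.2 2 0)) ++
      d.filter (fun kv => !erl.contains (PySem.List.pyGetD kv.2 2 0))).map Prod.fst).Nodup := by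
    have hperm := List.filter_append_perm (fun kv => erl.contains (PySem.List.pyGetD kv.2 2 0)) d
    exact ((hperm.map Prod.fst).nodup_iff).2 hnd
  unfold Spec_end_route_first
  simp only [end_route_first, end_route_first_alt]
  rw [erfLoop1_eq, hkey, sorted_binary_key, dict_ofList_items_of_nodup _ hnd',
    PySem.List.foldl_append_singleton]
  simp
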